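-- pv_equiv track=rewrite | github.com/MrBrantCode/unitest_baseline | mut_generate/mist_train_taco/taco_6871/solution.py | get_kth_boom_number
-- ===== SOURCE A (Python) =====
-- def get_kth_boom_number(K: int) -> str:
--     res = ''
--     d = {0: '2', 1: '3'}
--     n = K + 1
--     while n != 1:
--         res += d[n % 2]
--         n = n // 2
--     return res[::-1]
-- ===== SOURCE B (Python) =====
-- def get_kth_boom_number(K: int) -> str:
--     if K <= 0:
--         return ''
--     return get_kth_boom_number((K - 1) // 2) + ('2' if K % 2 == 1 else '3')
-- ===== Notes on version B (the rewrite author's own statement) =====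
-- stated objective: simpler
-- what changed: Instead of extracting the binary bits of K+1 LSB-first with a mod/floor-div loop, a dict lookup and a final reversal, B recurses directly on the index K in the implicit binary tree of boom numbers: the last digit comes from K's own parity and the prefix is the boom number of the parent index (K-1)//2, so the string is built MSB-first with no K+1, no dict and no reversal.
import Mathlib
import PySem

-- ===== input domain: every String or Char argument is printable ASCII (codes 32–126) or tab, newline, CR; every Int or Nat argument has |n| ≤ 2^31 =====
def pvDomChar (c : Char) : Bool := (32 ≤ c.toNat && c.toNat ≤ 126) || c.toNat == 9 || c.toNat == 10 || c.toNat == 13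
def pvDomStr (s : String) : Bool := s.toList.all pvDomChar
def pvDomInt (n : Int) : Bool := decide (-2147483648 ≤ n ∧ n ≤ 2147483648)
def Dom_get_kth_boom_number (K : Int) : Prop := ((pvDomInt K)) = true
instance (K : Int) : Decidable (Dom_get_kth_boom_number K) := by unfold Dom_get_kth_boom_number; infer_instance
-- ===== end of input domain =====

-- B recurses directly on the index K in the binary tree of boom numbers (last digit from
-- K's parity, prefix from the parent index (K-1)//2), building the string MSB-first and
-- replacing A's LSB-first mod/div bit loop over K+1, its dict and its final reversal
-- (objective: simpler). Equivalence is claimed on K ≥ 0 (Pre_); for K < 0 the Python A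
-- never terminates.

-- ===== PORT A =====
-- fuel-bounded transliteration of A's 'while n != 1' loop; fuel (K+1).toNat + 1 is
-- enough iterations for every K ≥ 0 (outside Pre_ the Python loop never terminates).
def pvALoop (d : PySem.Dict Int Char) : Nat → Int → List Char → List Char
  | 0, _, res => res
  | fuel + 1, n, res =>
    if n ≠ 1 then
      pvALoop d fuel (PySem.Int.floordiv n 2)
        (res ++ [(PySem.Dict.getD d (PySem.Int.mod n 2) ' ')])
    else res

def get_kth_boom_number (K : Int) : String :=
  let d : PySem.Dict Int Char := PySem.Dict.ofList [(0, '2'), (1, '3')]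
  let n : Int := K + 1
  let res := pvALoop d (n.toNat + 1) n []
  String.ofList (((PySem.List.slice? res none none (-1)).getD []))  -- res[::-1]

-- ===== PORT B =====
def get_kth_boom_number_alt (K : Int) : String :=
  if _h : K ≤ 0 then ""
  else get_kth_boom_number_alt (PySem.Int.floordiv (K - 1) 2)
        ++ (if PySem.Int.mod K 2 = 1 then "2" else "3")
  termination_by K.toNat
  decreasing_by
    rw [PySem.Int.floordiv_eq_ediv_of_pos (by omega)]
    omega

-- ===== PRECONDITION & SPEC =====
-- Pre_ excludes K < 0: there n = K + 1 reaches 0 and the Python A loops forever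
-- (0 // 2 == 0), so A returns on no such input.
def Pre_get_kth_boom_number (K : Int) : Prop := 0 ≤ K
instance (K : Int) : Decidable (Pre_get_kth_boom_number K) := by unfold Pre_get_kth_boom_number; infer_instance
def pvWitness_get_kth_boom_number : Int := (5)
def Spec_get_kth_boom_number (K : Int) (out : String) : Prop := out = get_kth_boom_number_alt K
instance (K : Int) (out : String) : Decidable (Spec_get_kth_boom_number K out) := by unfold Spec_get_kth_boom_number; infer_instance

-- ===== CLAIM (what is proved, stated in full; the proofs are below) =====
def Claim_equal_get_kth_boom_number : Prop := ∀ (K : Int), Dom_get_kth_boom_number K → Pre_get_kth_boom_number K → Spec_get_kth_boom_number K (get_kth_boom_number K)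

-- ===== LEMMAS AND PROOFS =====

-- proof-side abstraction: the mapped binary digits of n beyond the leading 1, LSB-first
def pvDigits : Nat → List Char
  | n =>
    if h : n ≤ 1 then []
    else (if n % 2 == 0 then '2' else '3') :: pvDigits (n / 2)
  termination_by n => n
  decreasing_by exact Nat.div_lt_self (by omega) (by omega)

-- A's loop, run on ↑n with enough fuel, appends exactly pvDigits n
theorem pvALoop_eq (fuel : Nat) : ∀ (n : Nat) (res : List Char), 1 ≤ n → n ≤ fuel →
    pvALoop (PySem.Dict.ofList [(0, '2'), (1, '3')]) fuel (n : Int) res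
      = res ++ pvDigits n := by
  induction fuel with
  | zero => intro n res h1 h2; omega
  | succ fuel ih =>
    intro n res h1 h2
    by_cases hn : n = 1
    · subst hn
      rw [pvALoop, pvDigits]
      norm_num
    · have h2n : 2 ≤ n := by omega
      have hne : (n : Int) ≠ 1 := by exact_mod_cast hn
      rw [pvALoop]
      simp only [hne, ne_eq, not_false_eq_true, if_true]
      have hfd : PySem.Int.floordiv (n : Int) 2 = ((n / 2 : Nat) : Int) := by
        exact_mod_cast PySem.Int.floordiv_natCast n 2
      have hmd : PySem.Int.mod (n : Int) 2 = ((n % 2 : Nat) : Int) := by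
        exact_mod_cast PySem.Int.mod_natCast n 2
      rw [hfd, hmd, ih (n / 2) _ (by omega) (by omega)]
      conv_rhs => rw [pvDigits]
      have hgt : ¬ (n ≤ 1) := by omega
      simp only [hgt, dif_neg, not_false_iff, List.append_assoc, List.singleton_append]
      congr 2
      have : n % 2 = 0 ∨ n % 2 = 1 := Nat.mod_two_eq_zero_or_one n
      rcases this with h | h <;> simp [h, PySem.Dict.getD] <;> decide

-- B at index n - 1 is exactly pvDigits n reversed
theorem alt_eq (n : Nat) (h1 : 1 ≤ n) :
    get_kth_boom_number_alt ((n : Int) - 1) = String.ofList (pvDigits n).reverse := by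
  induction n using Nat.strong_induction_on with
  | _ n ih =>
    by_cases hn : n = 1
    · subst hn
      rw [get_kth_boom_number_alt, pvDigits]
      norm_num
    · have h2n : 2 ≤ n := by omega
      rw [get_kth_boom_number_alt]
      have hK : ¬ ((n : Int) - 1 ≤ 0) := by omega
      simp only [hK, dif_neg, not_false_iff]
      have hfd : PySem.Int.floordiv ((n : Int) - 1 - 1) 2 = ((n / 2 : Nat) : Int) - 1 := by
        have : ((n : Int) - 1 - 1) = ((n - 2 : Nat) : Int) := by omega
        rw [this]
        have h2 : PySem.Int.floordiv ((n - 2 : Nat) : Int) 2 = (((n - 2) / 2 : Nat) : Int) := by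
          exact_mod_cast PySem.Int.floordiv_natCast (n - 2) 2
        rw [h2]
        omega
      rw [hfd, ih (n / 2) (by omega) (by omega)]
      conv_rhs => rw [pvDigits]
      have hgt : ¬ (n ≤ 1) := by omega
      simp only [hgt, dif_neg, not_false_iff, List.reverse_cons]
      have hmod : PySem.Int.mod ((n : Int) - 1) 2 = (((n - 1) % 2 : Nat) : Int) := by
        have : ((n : Int) - 1) = ((n - 1 : Nat) : Int) := by omega
        rw [this]; exact_mod_cast PySem.Int.mod_natCast (n - 1) 2
      rw [hmod]
      have : n % 2 = 0 ∨ n % 2 = 1 := Nat.mod_two_eq_zero_or_one n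
      rcases this with h | h
      · have h1m : (n - 1) % 2 = 1 := by omega
        simp [h1m, h, String.ofList_append]
      · have h1m : (n - 1) % 2 = 0 := by omega
        simp [h1m, h, String.ofList_append]

-- ===== VERDICT (by name: the statement is the Claim_ definition above) =====
theorem get_kth_boom_number_spec : Claim_equal_get_kth_boom_number := by
  intro K _ hK
  unfold Pre_get_kth_boom_number at hK
  unfold Spec_get_kth_boom_number
  show String.ofList ((PySem.List.slice? (pvALoop (PySem.Dict.ofList [(0, '2'), (1, '3')]) ((K + 1).toNat + 1) (K + 1) []) none none (-1)).getD [])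
      = get_kth_boom_number_alt K
  set n : Nat := (K + 1).toNat with hn
  have hcast : (K + 1 : Int) = (n : Int) := by omega
  have h1 : 1 ≤ n := by omega
  have hKn : K = (n : Int) - 1 := by omega
  rw [hcast, pvALoop_eq (n + 1) n [] h1 (by omega), PySem.List.slice?_none_none_neg_one,
    hKn, alt_eq n h1]
  simp
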